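-- pv_equiv track=rewrite | github.com/jinwei15/java-PythonSyntax-Leetcode | LeetCode/src/NoPaireAllowed.py | minimalOperations
-- ===== SOURCE A (Python) =====
-- def minimalOperations(input):
--     #input is string array
--     inputLength = len(input)
--     res = [0 for _ in range(inputLength)]
--     for i in range(inputLength):
--         start = 0
--         end = 1
--         while(len(input[i]) >= 2 and  end < len(input[i])):
--             if input[i][start] != input[i][end]:
--
--                 diff = end - start
--                 res[i] += diff // 2
--                 start = end
--                 end = start + 1
--             else:
--                 end += 1
--
--         if end - start >= 2:
--             res[i] += (end - start)//2
--
--     return res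
-- ===== SOURCE B (Python) =====
-- def _pairs(s):
--     # greedily match disjoint adjacent equal pairs, skipping both characters of a match
--     i = 0
--     count = 0
--     n = len(s)
--     while i + 1 < n:
--         if s[i] == s[i + 1]:
--             count += 1
--             i += 2
--         else:
--             i += 1
--     return count
--
--
-- def minimalOperations(input):
--     return [_pairs(s) for s in input]
-- ===== Notes on version B (the rewrite author's own statement) =====
-- stated objective: alternative
-- what changed: B counts greedily-matched disjoint adjacent equal pairs (advancing two positions past each match) instead of detecting maximal run boundaries and summing floor(run_length/2); the counts coincide because each maximal run of length L yields exactly floor(L/2) disjoint adjacent pairs.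
import Mathlib
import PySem

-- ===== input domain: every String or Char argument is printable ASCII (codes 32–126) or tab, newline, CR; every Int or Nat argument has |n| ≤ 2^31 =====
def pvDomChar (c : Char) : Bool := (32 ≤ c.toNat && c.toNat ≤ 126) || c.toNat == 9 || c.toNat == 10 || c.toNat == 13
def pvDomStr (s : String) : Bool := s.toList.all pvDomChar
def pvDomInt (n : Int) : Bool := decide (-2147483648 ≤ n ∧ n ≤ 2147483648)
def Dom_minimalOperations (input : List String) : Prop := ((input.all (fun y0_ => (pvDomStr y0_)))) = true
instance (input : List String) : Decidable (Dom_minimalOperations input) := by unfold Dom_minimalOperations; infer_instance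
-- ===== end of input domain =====

-- B greedily counts disjoint adjacent equal pairs (skipping both characters of a match) instead
-- of A's run-boundary detection summing floor(run/2) (objective: alternative); return values
-- proved equal on all inputs.

-- ===== PORT A =====
-- A's while loop over indices start/end; indices read are always in range (start < end ≤ length
-- during the loop), so getD's default is never used.
def goA (cs : List Char) (start fin : Nat) (acc : Int) : Int :=
  if h : 2 ≤ cs.length ∧ fin < cs.length then
    if cs.getD start ' ' ≠ cs.getD fin ' ' then
      goA cs fin (fin + 1) (acc + PySem.Int.floordiv ((fin : Int) - (start : Int)) 2)
    else
      goA cs start (fin + 1) acc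
  else
    if ((fin : Int) - (start : Int)) ≥ 2 then acc + PySem.Int.floordiv ((fin : Int) - (start : Int)) 2
    else acc
termination_by cs.length - fin
decreasing_by all_goals omega

def minimalOperations (input : List String) : List Int :=
  input.map (fun s => goA s.toList 0 1 0)

-- ===== PORT B =====
-- B's while loop 'i+1 < n': advancing i by 2 on a match drops both characters, by 1 otherwise
-- drops one; the count is the running accumulator folded into the recursion.
def goB : List Char → Int
  | a :: b :: t => if a = b then 1 + goB t else goB (b :: t)
  | _ => 0

def minimalOperations_alt (input : List String) : List Int :=
  input.map (fun s => goB s.toList)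

-- ===== PRECONDITION & SPEC =====
def Spec_minimalOperations (input : List String) (out : List Int) : Prop := out = minimalOperations_alt input
instance (input : List String) (out : List Int) : Decidable (Spec_minimalOperations input out) := by unfold Spec_minimalOperations; infer_instance

-- ===== CLAIM (what is proved, stated in full; the proofs are below) =====
def Claim_equal_minimalOperations : Prop := ∀ (input : List String), Dom_minimalOperations input → Spec_minimalOperations input (minimalOperations input)

-- ===== LEMMAS AND PROOFS =====

-- proof-side characterization: both programs compute, per string, the sum of ⌊run length / 2⌋
-- over maximal runs of equal characters.
def groupRuns : List Char → List (List Char)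
  | [] => []
  | c :: rest =>
      (c :: rest.takeWhile (· == c)) :: groupRuns (rest.dropWhile (· == c))
termination_by l => l.length
decreasing_by
  simp only [List.length_cons]
  exact Nat.lt_succ_of_le (List.length_dropWhile_le _ _)

def runSum (l : List Char) : Int :=
  ((groupRuns l).map (fun g => PySem.Int.floordiv (g.length : Int) 2)).sum

lemma takeWhile_replicate_append (m : Nat) (c : Char) (r : List Char) (hr : r.head? ≠ some c) :
    (List.replicate m c ++ r).takeWhile (· == c) = List.replicate m c ∧
    (List.replicate m c ++ r).dropWhile (· == c) = r := by
  induction m with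
  | zero =>
      simp only [List.replicate_zero, List.nil_append]
      cases r with
      | nil => simp
      | cons h t =>
          have : (h == c) = false := by
            simp only [List.head?_cons] at hr
            simp only [beq_eq_false_iff_ne]
            intro he; exact hr (by rw [he])
          simp [List.takeWhile, List.dropWhile, this]
  | succ k ih =>
      simp [List.replicate_succ, ih.1, ih.2]

lemma groupRuns_replicate_append (m : Nat) (c : Char) (r : List Char) (hm : 1 ≤ m)
    (hr : r.head? ≠ some c) :
    groupRuns (List.replicate m c ++ r) = (List.replicate m c) :: groupRuns r := by
  obtain ⟨k, rfl⟩ : ∃ k, m = k + 1 := ⟨m - 1, by omega⟩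
  rw [List.replicate_succ, List.cons_append, groupRuns]
  rw [(takeWhile_replicate_append k c r hr).1, (takeWhile_replicate_append k c r hr).2]

lemma runSum_replicate_append (m : Nat) (c : Char) (r : List Char) (hm : 1 ≤ m)
    (hr : r.head? ≠ some c) :
    runSum (List.replicate m c ++ r)
      = PySem.Int.floordiv (m : Int) 2 + runSum r := by
  unfold runSum
  rw [groupRuns_replicate_append m c r hm hr]
  simp

lemma runSum_nil : runSum [] = 0 := by simp [runSum, groupRuns]

-- A's loop computes runSum of the unscanned part of the string.
lemma goA_eq (cs : List Char) (fin : Nat) :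
    ∀ start acc, start < fin → fin ≤ cs.length →
      cs.drop start = List.replicate (fin - start) (cs.getD start ' ') ++ cs.drop fin →
      goA cs start fin acc = acc + runSum (cs.drop start) := by
  induction hn : cs.length - fin using Nat.strong_induction_on generalizing fin with
  | _ n ih =>
    intro start acc hsf hfn hinv
    rw [goA]
    by_cases hlt : fin < cs.length
    · have h2 : 2 ≤ cs.length ∧ fin < cs.length := ⟨by omega, hlt⟩
      rw [dif_pos h2]
      have hdropfin : cs.drop fin = cs[fin] :: cs.drop (fin + 1) :=
        List.drop_eq_getElem_cons hlt
      have hgfin : cs.getD fin ' ' = cs[fin] := List.getD_eq_getElem cs ' ' hlt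
      by_cases hne : cs.getD start ' ' ≠ cs.getD fin ' '
      · rw [if_pos hne]
        have hrec := ih (cs.length - (fin + 1)) (by omega) (fin + 1) rfl fin
          (acc + PySem.Int.floordiv ((fin : Int) - (start : Int)) 2) (by omega) (by omega)
          (by rw [hdropfin, ← hgfin]; simp)
        rw [hrec]
        have hsplit : runSum (cs.drop start)
            = PySem.Int.floordiv ((fin - start : Nat) : Int) 2 + runSum (cs.drop fin) := by
          rw [hinv]
          refine runSum_replicate_append _ _ _ (by omega) ?_
          rw [hdropfin]
          simp only [List.head?_cons, ne_eq, Option.some.injEq]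
          intro he; exact hne (by rw [hgfin, he])
        rw [hsplit]
        have hc : ((fin - start : Nat) : Int) = (fin : Int) - (start : Int) := by omega
        rw [hc, add_assoc]
      · rw [if_neg hne]
        have hne' : cs.getD start ' ' = cs.getD fin ' ' := not_ne_iff.mp hne
        have hrec := ih (cs.length - (fin + 1)) (by omega) (fin + 1) rfl start acc
          (by omega) (by omega) ?_
        · rw [hrec]
        · rw [hinv, hdropfin, ← hgfin, ← hne']
          have h1 : fin + 1 - start = (fin - start) + 1 := by omega
          rw [h1, List.replicate_succ']
          simp
    · have hfeq : fin = cs.length := by omega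
      rw [dif_neg (by omega)]
      have hdropfin : cs.drop fin = [] := by
        rw [hfeq]; simp
      have hm : 1 ≤ fin - start := by omega
      have hsum : runSum (cs.drop start) = PySem.Int.floordiv ((fin - start : Nat) : Int) 2 := by
        rw [hinv, hdropfin, List.append_nil]
        have := runSum_replicate_append (fin - start) (cs.getD start ' ') [] hm (by simp)
        rw [List.append_nil] at this
        rw [this, runSum_nil, add_zero]
      by_cases h2 : ((fin : Int) - (start : Int)) ≥ 2
      · rw [if_pos h2, hsum]
        have hc : ((fin - start : Nat) : Int) = (fin : Int) - (start : Int) := by omega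
        rw [hc]
      · have h1 : fin - start = 1 := by omega
        rw [if_neg h2, hsum, h1]
        simp

lemma perA_eq (s : String) : goA s.toList 0 1 0 = runSum s.toList := by
  cases hcs : s.toList with
  | nil =>
      rw [goA]
      simp [runSum_nil]
  | cons c t =>
      have := goA_eq (c :: t) 1 0 0 (by omega) (by simp) (by simp)
      simpa [runSum] using this

-- B's greedy pair matching on one maximal run: a run of length m yields ⌊m/2⌋ pairs.
lemma goB_replicate_append (m : Nat) (c : Char) (r : List Char) (hr : r.head? ≠ some c) :
    goB (List.replicate m c ++ r) = PySem.Int.floordiv (m : Int) 2 + goB r := by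
  induction m using Nat.strong_induction_on with
  | _ m ih =>
    match m with
    | 0 => simp
    | 1 =>
        cases r with
        | nil => simp [goB]
        | cons h t =>
            have hch : ¬ c = h := by
              simp only [List.head?_cons, ne_eq, Option.some.injEq] at hr
              intro he; exact hr he.symm
            simp [goB, hch]
    | m + 2 =>
        have hd : PySem.Int.floordiv ((m + 2 : Nat) : Int) 2
            = 1 + PySem.Int.floordiv ((m : Nat) : Int) 2 := by
          rw [PySem.Int.floordiv_eq_ediv_of_pos (by omega),
              PySem.Int.floordiv_eq_ediv_of_pos (by omega)]
          omega
        have hrepl : List.replicate (m + 2) c ++ r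
            = c :: c :: (List.replicate m c ++ r) := by
          simp [List.replicate_succ]
        have hstep : goB (c :: c :: (List.replicate m c ++ r))
            = 1 + goB (List.replicate m c ++ r) := by
          simp [goB]
        rw [hrepl, hstep, ih m (by omega), hd]
        ring

-- the head of the suffix left by dropWhile (· == c) is never c.
lemma head?_dropWhile_ne (c : Char) : ∀ (l : List Char), (l.dropWhile (· == c)).head? ≠ some c
  | [] => by simp
  | h :: t => by
      by_cases hp : h = c
      · simpa [hp] using head?_dropWhile_ne c t
      · simp [hp]

-- every list decomposes as its first maximal run followed by the rest; B equals runSum.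
lemma goB_eq (l : List Char) : goB l = runSum l := by
  induction hn : l.length using Nat.strong_induction_on generalizing l with
  | _ n ih =>
    cases l with
    | nil => simp [goB, runSum_nil]
    | cons c rest =>
        have htw : rest.takeWhile (· == c) = List.replicate (rest.takeWhile (· == c)).length c := by
          apply List.eq_replicate_length.mpr
          intro x hx
          exact eq_of_beq (List.mem_takeWhile_imp (p := (· == c)) hx)
        have hdecomp : c :: rest
            = List.replicate ((rest.takeWhile (· == c)).length + 1) c
              ++ rest.dropWhile (· == c) := by
          rw [List.replicate_succ, List.cons_append, ← htw, List.takeWhile_append_dropWhile]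
        have hhead : (rest.dropWhile (· == c)).head? ≠ some c := head?_dropWhile_ne c rest
        have hlen : (rest.dropWhile (· == c)).length < n := by
          have := List.length_dropWhile_le (p := (· == c)) (l := rest)
          simp only [← hn, List.length_cons]
          omega
        rw [hdecomp, goB_replicate_append _ c _ hhead,
            runSum_replicate_append _ c _ (by omega) hhead,
            ih _ hlen _ rfl]

-- ===== VERDICT (by name: the statement is the Claim_ definition above) =====
theorem minimalOperations_spec : Claim_equal_minimalOperations := by
  intro input _
  unfold Spec_minimalOperations minimalOperations minimalOperations_alt
  apply List.map_congr_left
  intro s _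
  rw [perA_eq, goB_eq]
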